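-- pv_equiv track=rewrite | github.com/sharito2023s-oss/Laboratorio5 | Primer Punto/Primer punto.py | total_satisfaction
-- ===== SOURCE A (Python) =====
-- satisfaction = [[0, 5, -2, 3, 1, 4],
--                 [5, 0, 3, -1, 2, 2],
--                 [-2, 3, 0, 4, -3, 5],
--                 [3, -1, 4, 0, 2, 1],
--                 [1, 2, -3, 2, 0, 4],
--                 [4, 2, 5, 1, 4, 0]]
--
-- def total_satisfaction(arrangement):
--     total = 0
--     n = len(arrangement)
--     for i in range(n):
--         left = arrangement[i - 1]  # Persona a la izquierda
--         right = arrangement[(i + 1) % n]  # Persona a la derecha (circular)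
--         person = arrangement[i]
--         total += satisfaction[person][left] + satisfaction[person][right]
--     return total
-- ===== SOURCE B (Python) =====
-- satisfaction = [[0, 5, -2, 3, 1, 4],
--                 [5, 0, 3, -1, 2, 2],
--                 [-2, 3, 0, 4, -3, 5],
--                 [3, -1, 4, 0, 2, 1],
--                 [1, 2, -3, 2, 0, 4],
--                 [4, 2, 5, 1, 4, 0]]
--
-- def total_satisfaction(arrangement):
--     # Divide and conquer over index intervals: seg(lo, hi) is the satisfaction
--     # contributed by the edges strictly inside arrangement[lo:hi]; the wrap-around
--     # edge (last, first) is added at the end.  For each edge (a, b) both directed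
--     # contributions satisfaction[a][b] and satisfaction[b][a] are accounted at once.
--     n = len(arrangement)
--     if n == 0:
--         return 0
--
--     def seg(lo, hi):
--         if hi - lo <= 1:
--             return 0
--         mid = (lo + hi) // 2
--         a = arrangement[mid - 1]
--         b = arrangement[mid]
--         return seg(lo, mid) + seg(mid, hi) + satisfaction[a][b] + satisfaction[b][a]
--
--     a = arrangement[-1]
--     b = arrangement[0]
--     return seg(0, n) + satisfaction[a][b] + satisfaction[b][a]
-- ===== Notes on version B (the rewrite author's own statement) =====
-- stated objective: alternative
-- what changed: B computes the circular sum by divide and conquer on index intervals (seg(lo,hi) recursively splits at mid and adds both directed contributions of the one edge crossing the split), plus the wrap-around edge, instead of A's linear indexed loop adding each person's left and right lookups.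
import Mathlib
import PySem

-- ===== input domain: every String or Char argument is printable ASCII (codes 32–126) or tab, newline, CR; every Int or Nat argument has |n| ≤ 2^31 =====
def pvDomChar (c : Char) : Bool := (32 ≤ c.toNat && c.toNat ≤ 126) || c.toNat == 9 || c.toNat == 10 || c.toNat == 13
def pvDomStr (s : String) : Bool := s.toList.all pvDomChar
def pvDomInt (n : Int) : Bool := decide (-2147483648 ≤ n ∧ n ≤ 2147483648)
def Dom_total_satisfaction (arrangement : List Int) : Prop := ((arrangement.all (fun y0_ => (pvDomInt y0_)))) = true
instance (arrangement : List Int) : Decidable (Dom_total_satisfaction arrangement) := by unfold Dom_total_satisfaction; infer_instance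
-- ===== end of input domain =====

-- B computes the circular sum by divide and conquer on index intervals (each split accounts the
-- one crossing edge's two directed contributions), plus the wrap-around edge, instead of A's
-- linear indexed loop of per-person left+right lookups (objective: alternative, same O(n) cost).


-- ===== PORT A =====
-- the module-level table `satisfaction`
def satTable : List (List Int) :=
  [[0, 5, -2, 3, 1, 4],
   [5, 0, 3, -1, 2, 2],
   [-2, 3, 0, 4, -3, 5],
   [3, -1, 4, 0, 2, 1],
   [1, 2, -3, 2, 0, 4],
   [4, 2, 5, 1, 4, 0]]

-- satisfaction[p][q]; total under Pre_ (indices in [-6,5]), defaults only fire outside Pre_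
def satLookup (p q : Int) : Int :=
  PySem.List.pyGetD (PySem.List.pyGetD satTable p []) q 0

def total_satisfaction (arrangement : List Int) : Int :=
  let n : Int := PySem.List.len arrangement
  (PySem.List.pyRange 0 n 1).foldl (fun total i =>
    let left := PySem.List.pyGetD arrangement (i - 1) 0
    let right := PySem.List.pyGetD arrangement (PySem.Int.mod (i + 1) n) 0
    let person := PySem.List.pyGetD arrangement i 0
    total + (satLookup person left + satLookup person right)) 0

-- ===== PORT B =====
-- seg(lo, hi): satisfaction of the edges strictly inside arrangement[lo:hi], by halving
def segDC (arrangement : List Int) (lo hi : Nat) : Int :=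
  if hi - lo ≤ 1 then 0
  else
    segDC arrangement lo ((lo + hi) / 2) + segDC arrangement ((lo + hi) / 2) hi
      + (satLookup (PySem.List.pyGetD arrangement (((lo + hi) / 2 - 1 : Nat) : Int) 0)
                   (PySem.List.pyGetD arrangement (((lo + hi) / 2 : Nat) : Int) 0)
       + satLookup (PySem.List.pyGetD arrangement (((lo + hi) / 2 : Nat) : Int) 0)
                   (PySem.List.pyGetD arrangement (((lo + hi) / 2 - 1 : Nat) : Int) 0))
termination_by hi - lo
decreasing_by all_goals omega

def total_satisfaction_alt (arrangement : List Int) : Int :=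
  let n := arrangement.length
  if n = 0 then 0
  else
    let a := PySem.List.pyGetD arrangement (-1) 0
    let b := PySem.List.pyGetD arrangement 0 0
    segDC arrangement 0 n + (satLookup a b + satLookup b a)

-- ===== PRECONDITION & SPEC =====
-- Pre_ excludes exactly the inputs on which Python A raises IndexError: an element below -6
-- or above 5 is an invalid index into the 6x6 satisfaction table (negative indices wrap).
def Pre_total_satisfaction (arrangement : List Int) : Prop :=
  ∀ x ∈ arrangement, -6 ≤ x ∧ x ≤ 5
instance (arrangement : List Int) : Decidable (Pre_total_satisfaction arrangement) := by
  unfold Pre_total_satisfaction; infer_instance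

def pvWitness_total_satisfaction : List Int := [0, 3, 5, 2]

def Spec_total_satisfaction (arrangement : List Int) (out : Int) : Prop := out = total_satisfaction_alt arrangement
instance (arrangement : List Int) (out : Int) : Decidable (Spec_total_satisfaction arrangement out) := by unfold Spec_total_satisfaction; infer_instance

-- ===== CLAIM (what is proved, stated in full; the proofs are below) =====
def Claim_equal_total_satisfaction : Prop := ∀ (arrangement : List Int), Dom_total_satisfaction arrangement → Pre_total_satisfaction arrangement → Spec_total_satisfaction arrangement (total_satisfaction arrangement)

-- ===== LEMMAS AND PROOFS =====

-- successor of the circular predecessor is the identity on [0, n)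
theorem succ_pred_mod (n a : Nat) (ha : a < n) : ((a + n - 1) % n + 1) % n = a := by
  rcases Nat.eq_zero_or_pos a with rfl | hpos
  · have h0 : 0 + n - 1 = n - 1 := by omega
    have h1 : (n - 1) % n = n - 1 := Nat.mod_eq_of_lt (by omega)
    have h2 : n - 1 + 1 = n := by omega
    rw [h0, h1, h2, Nat.mod_self]
  · have h0 : a + n - 1 = (a - 1) + n := by omega
    have h1 : ((a - 1) + n) % n = (a - 1) % n := Nat.add_mod_right _ _
    have h2 : (a - 1) % n = a - 1 := Nat.mod_eq_of_lt (by omega)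
    have h3 : a - 1 + 1 = a := by omega
    rw [h0, h1, h2, h3, Nat.mod_eq_of_lt ha]

-- circular predecessor of the successor is the identity on [0, n)
theorem pred_succ_mod (n a : Nat) (ha : a < n) : ((a + 1) % n + n - 1) % n = a := by
  rcases Nat.lt_or_ge (a + 1) n with h | h
  · have h1 : (a + 1) % n = a + 1 := Nat.mod_eq_of_lt h
    have h2 : a + 1 + n - 1 = a + n := by omega
    rw [h1, h2, Nat.add_mod_right, Nat.mod_eq_of_lt ha]
  · have h1 : a + 1 = n := by omega
    have h2 : n % n = 0 := Nat.mod_self n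
    have h3 : 0 + n - 1 = n - 1 := by omega
    have h4 : (n - 1) % n = n - 1 := Nat.mod_eq_of_lt (by omega)
    rw [h1, h2, h3, h4]; omega

-- reindexing a cyclic sum: pairing each person with its left neighbour gives the same multiset of
-- directed pairs as pairing each right neighbour with its person
theorem cyc_shift (u : Nat → Int) (n : Nat) :
    ((List.range n).map (fun k => satLookup (u k) (u ((k + n - 1) % n)))).sum
      = ((List.range n).map (fun k => satLookup (u ((k + 1) % n)) (u k))).sum := by
  show (∑ k ∈ Finset.range n, satLookup (u k) (u ((k + n - 1) % n)))
      = ∑ k ∈ Finset.range n, satLookup (u ((k + 1) % n)) (u k)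
  refine Finset.sum_nbij' (fun k => (k + n - 1) % n) (fun k => (k + 1) % n)
    ?_ ?_ ?_ ?_ ?_ <;> intro a ha <;> simp only [Finset.mem_range] at *
  · exact Nat.mod_lt _ (by omega)
  · exact Nat.mod_lt _ (by omega)
  · exact succ_pred_mod n a ha
  · exact pred_succ_mod n a ha
  · show satLookup (u a) (u ((a + n - 1) % n))
        = satLookup (u (((a + n - 1) % n + 1) % n)) (u ((a + n - 1) % n))
    rw [succ_pred_mod n a ha]

-- A's loop, written as a sum of per-person terms with Nat indices into the circle
theorem a_terms (arr : List Int) :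
    total_satisfaction arr
      = ((List.range arr.length).map (fun k =>
            satLookup (arr.getD k 0) (arr.getD ((k + arr.length - 1) % arr.length) 0)
          + satLookup (arr.getD k 0) (arr.getD ((k + 1) % arr.length) 0))).sum := by
  simp only [total_satisfaction, PySem.List.len_eq]
  rw [PySem.List.pyRange_zero_natCast, List.foldl_map, PySem.List.foldl_add, zero_add]
  congr 1
  apply List.map_congr_left
  intro k hk
  rw [List.mem_range] at hk
  have hn : 0 < arr.length := by omega
  have hperson : PySem.List.pyGetD arr (k : Int) 0 = arr.getD k 0 :=
    PySem.List.pyGetD_natCast arr k 0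
  have hleft : PySem.List.pyGetD arr ((k : Int) - 1) 0
      = arr.getD ((k + arr.length - 1) % arr.length) 0 := by
    rcases Nat.eq_zero_or_pos k with rfl | hkpos
    · have h0 : ((0 : Nat) : Int) - 1 = -1 := by norm_num
      rw [h0, PySem.List.pyGetD_neg_one arr 0 (by intro hnil; simp [hnil] at hn)]
      rw [List.getLast_eq_getElem]
      have h0 : 0 + arr.length - 1 = arr.length - 1 := by omega
      have h1 : (arr.length - 1) % arr.length = arr.length - 1 :=
        Nat.mod_eq_of_lt (by omega)
      rw [h0, h1, List.getD_eq_getElem arr 0 (by omega)]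
    · have hcast : ((k : Nat) : Int) - 1 = ((k - 1 : Nat) : Int) := by omega
      rw [hcast, PySem.List.pyGetD_natCast]
      have h1 : (k + arr.length - 1) % arr.length = k - 1 := by
        have h2 : k + arr.length - 1 = (k - 1) + arr.length := by omega
        rw [h2, Nat.add_mod_right, Nat.mod_eq_of_lt (by omega)]
      rw [h1]
  have hright : PySem.List.pyGetD arr (PySem.Int.mod ((k : Int) + 1) (arr.length : Int)) 0
      = arr.getD ((k + 1) % arr.length) 0 := by
    have hc : ((k : Nat) : Int) + 1 = ((k + 1 : Nat) : Int) := by push_cast; ring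
    rw [hc, PySem.Int.mod_natCast, PySem.List.pyGetD_natCast]
  rw [hperson, hleft, hright]

-- segDC over [lo, hi) is the sum of the both-direction values of the internal edges (j, j+1)
theorem segDC_eq (arr : List Int) :
    ∀ d lo hi, hi - lo = d →
      segDC arr lo hi
        = ∑ j ∈ Finset.Ico lo (hi - 1),
            (satLookup (arr.getD j 0) (arr.getD (j + 1) 0)
           + satLookup (arr.getD (j + 1) 0) (arr.getD j 0)) := by
  intro d
  induction d using Nat.strong_induction_on with
  | _ d ih =>
    intro lo hi hd
    rw [segDC]
    by_cases h : hi - lo ≤ 1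
    · rw [if_pos h, Finset.Ico_eq_empty (by omega), Finset.sum_empty]
    · rw [if_neg h]
      have hlo : lo < (lo + hi) / 2 := by omega
      have hhi : (lo + hi) / 2 < hi := by omega
      rw [ih ((lo + hi) / 2 - lo) (by omega) lo ((lo + hi) / 2) rfl,
          ih (hi - (lo + hi) / 2) (by omega) ((lo + hi) / 2) hi rfl]
      have hsplit :
          (∑ j ∈ Finset.Ico lo (hi - 1),
              (satLookup (arr.getD j 0) (arr.getD (j + 1) 0)
             + satLookup (arr.getD (j + 1) 0) (arr.getD j 0)))
            = (∑ j ∈ Finset.Ico lo ((lo + hi) / 2 - 1),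
                (satLookup (arr.getD j 0) (arr.getD (j + 1) 0)
               + satLookup (arr.getD (j + 1) 0) (arr.getD j 0)))
            + ∑ j ∈ Finset.Ico ((lo + hi) / 2 - 1) (hi - 1),
                (satLookup (arr.getD j 0) (arr.getD (j + 1) 0)
               + satLookup (arr.getD (j + 1) 0) (arr.getD j 0)) :=
        (Finset.sum_Ico_consecutive _ (by omega) (by omega)).symm
      have hpeel :
          (∑ j ∈ Finset.Ico ((lo + hi) / 2 - 1) (hi - 1),
              (satLookup (arr.getD j 0) (arr.getD (j + 1) 0)
             + satLookup (arr.getD (j + 1) 0) (arr.getD j 0)))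
            = (satLookup (arr.getD ((lo + hi) / 2 - 1) 0) (arr.getD ((lo + hi) / 2) 0)
             + satLookup (arr.getD ((lo + hi) / 2) 0) (arr.getD ((lo + hi) / 2 - 1) 0))
            + ∑ j ∈ Finset.Ico ((lo + hi) / 2) (hi - 1),
                (satLookup (arr.getD j 0) (arr.getD (j + 1) 0)
               + satLookup (arr.getD (j + 1) 0) (arr.getD j 0)) := by
        rw [Finset.sum_eq_sum_Ico_succ_bot (by omega)]
        have heq : (lo + hi) / 2 - 1 + 1 = (lo + hi) / 2 := by omega
        rw [heq]
      rw [hsplit, hpeel]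
      have hget1 : PySem.List.pyGetD arr (((lo + hi) / 2 - 1 : Nat) : Int) 0
          = arr.getD ((lo + hi) / 2 - 1) 0 := PySem.List.pyGetD_natCast arr _ 0
      have hget2 : PySem.List.pyGetD arr (((lo + hi) / 2 : Nat) : Int) 0
          = arr.getD ((lo + hi) / 2) 0 := PySem.List.pyGetD_natCast arr _ 0
      rw [hget1, hget2]
      ring

-- B's result, written as a sum of per-edge terms with Nat indices into the circle
theorem b_terms (arr : List Int) :
    total_satisfaction_alt arr
      = ((List.range arr.length).map (fun k =>
            satLookup (arr.getD k 0) (arr.getD ((k + 1) % arr.length) 0)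
          + satLookup (arr.getD ((k + 1) % arr.length) 0) (arr.getD k 0))).sum := by
  by_cases hnil : arr = []
  · simp [hnil, total_satisfaction_alt]
  · have hn : 0 < arr.length := List.length_pos_iff.mpr hnil
    simp only [total_satisfaction_alt, if_neg (by omega : ¬ arr.length = 0)]
    have hlast : PySem.List.pyGetD arr (-1) 0 = arr.getD (arr.length - 1) 0 := by
      rw [PySem.List.pyGetD_neg_one arr 0 (by intro hnil; simp [hnil] at hn),
          List.getLast_eq_getElem, List.getD_eq_getElem arr 0 (by omega)]
    have hfirst : PySem.List.pyGetD arr 0 0 = arr.getD 0 0 := by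
      have := PySem.List.pyGetD_natCast arr 0 0
      simpa using this
    rw [hlast, hfirst, segDC_eq arr (arr.length - 0) 0 arr.length rfl]
    show _ = ∑ k ∈ Finset.range arr.length,
        (satLookup (arr.getD k 0) (arr.getD ((k + 1) % arr.length) 0)
       + satLookup (arr.getD ((k + 1) % arr.length) 0) (arr.getD k 0))
    have hrange : arr.length = (arr.length - 1) + 1 := by omega
    rw [hrange, Finset.sum_range_succ, ← hrange, Nat.mod_self]
    have hbody : ∑ k ∈ Finset.range (arr.length - 1),
        (satLookup (arr.getD k 0) (arr.getD ((k + 1) % arr.length) 0)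
       + satLookup (arr.getD ((k + 1) % arr.length) 0) (arr.getD k 0))
        = ∑ j ∈ Finset.Ico 0 (arr.length - 1),
            (satLookup (arr.getD j 0) (arr.getD (j + 1) 0)
           + satLookup (arr.getD (j + 1) 0) (arr.getD j 0)) := by
      rw [Finset.range_eq_Ico]
      apply Finset.sum_congr rfl
      intro j hj
      rw [Finset.mem_Ico] at hj
      rw [Nat.mod_eq_of_lt (by omega)]
    rw [hbody]

-- splitting the sum of a pointwise sum of Int-valued maps (used on A's per-person terms)
theorem sum_map_split (n : Nat) (f g : Nat → Int) :
    ((List.range n).map (fun k => f k + g k)).sum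
      = ((List.range n).map f).sum + ((List.range n).map g).sum := by
  induction n with
  | zero => simp
  | succ m ih => simp [List.range_succ, ih]; ring

-- ===== VERDICT (by name: the statement is the Claim_ definition above) =====
theorem total_satisfaction_spec : Claim_equal_total_satisfaction := by
  intro arr _ _
  unfold Spec_total_satisfaction
  rw [a_terms, b_terms, sum_map_split, sum_map_split,
      cyc_shift (fun k => arr.getD k 0) arr.length]
  ring
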